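-- pv_equiv track=rewrite | github.com/w2sv/Lingularity-Frontend-Ubuntu-Console | src/utils/strings.py | lower_case_sentence_beginnings
-- ===== SOURCE A (Python) =====
-- def lower_case_sentence_beginnings(sentence: str) -> str:
--     chars = list(sentence)
--     chars[0] = chars[0].lower()
--     point_positions = [i for i in range(len(sentence) - 1) if sentence[i: i + 2] == '. ']
--     if point_positions:
--         for i in point_positions:
--             chars[i + 2] = chars[i + 2].lower()
--     return ''.join(chars)
-- ===== SOURCE B (Python) =====
-- def lower_case_sentence_beginnings(sentence: str) -> str:
--     out = []
--     prev2, prev1 = '.', ' '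
--     for ch in sentence:
--         out.append(ch.lower() if (prev2, prev1) == ('.', ' ') else ch)
--         prev2, prev1 = prev1, ch
--     return ''.join(out)
-- ===== Notes on version B (the rewrite author's own statement) =====
-- stated objective: simpler
-- what changed: Replaces A's two-pass mutate-a-char-array scheme (build a list of '. ' positions with slice comparisons, then write lowered chars back at position+2) by a single left-to-right pass that carries the last two characters seen and lowers the current character exactly when they are '. ' (or at the very start); no index list and no in-place mutation.
-- outside the precondition, e.g. on lower_case_sentence_beginnings('. '): A raises IndexError, B returns '. '; on lower_case_sentence_beginnings(''): A raises IndexError, B returns ''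
import Mathlib
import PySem

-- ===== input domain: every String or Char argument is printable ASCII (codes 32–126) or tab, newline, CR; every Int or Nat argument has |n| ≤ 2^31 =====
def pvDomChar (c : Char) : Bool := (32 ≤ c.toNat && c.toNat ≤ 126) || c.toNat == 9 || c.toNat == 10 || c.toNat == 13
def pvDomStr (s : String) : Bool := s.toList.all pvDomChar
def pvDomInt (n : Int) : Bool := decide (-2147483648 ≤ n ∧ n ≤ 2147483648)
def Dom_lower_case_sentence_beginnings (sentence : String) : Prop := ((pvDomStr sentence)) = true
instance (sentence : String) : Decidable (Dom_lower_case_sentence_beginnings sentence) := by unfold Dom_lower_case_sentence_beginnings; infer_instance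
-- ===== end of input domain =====

-- B replaces A's two-pass index-collect-then-mutate scheme by a single pass carrying the
-- last two characters seen (objective: simpler); on the empty string and on strings ending
-- in '. ' the Python A raises IndexError (those inputs are outside Pre_) while B returns.


-- ===== PORT A =====
-- A-side helper: the body of A's 'for i in point_positions' loop (chars[i+2] = chars[i+2].lower()).
def pvStepA (cs : List Char) (i : Nat) : List Char :=
  cs.set (i + 2) (PySem.Chars.lowerChar (cs.getD (i + 2) ' '))

def lower_case_sentence_beginnings (sentence : String) : String :=
  let l := sentence.toList
  -- chars = list(sentence); chars[0] = chars[0].lower()  (the empty string raises: outside Pre_)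
  let chars := l.set 0 (PySem.Chars.lowerChar (l.getD 0 ' '))
  let point_positions := (List.range (l.length - 1)).filter
      (fun (i : Nat) => PySem.List.slice l (some (i : Int)) (some ((i : Int) + 2)) == ['.', ' '])
  let chars := if point_positions ≠ [] then point_positions.foldl pvStepA chars else chars
  String.ofList chars

-- ===== PORT B =====
-- B-side helper: the loop body — append (lowered) ch, shift (prev2, prev1) to (prev1, ch).
def pvStepB (st : (Char × Char) × List Char) (ch : Char) : (Char × Char) × List Char :=
  ((st.1.2, ch),
   st.2 ++ [if st.1.1 = '.' ∧ st.1.2 = ' ' then PySem.Chars.lowerChar ch else ch])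

def lower_case_sentence_beginnings_alt (sentence : String) : String :=
  String.ofList (sentence.toList.foldl pvStepB (('.', ' '), [])).2

-- ===== PRECONDITION & SPEC =====
-- Pre_ excludes exactly the inputs on which Python A raises IndexError: the empty string
-- (chars[0]) and strings ending in '. ' (chars[i+2] indexes one past the end).
def Pre_lower_case_sentence_beginnings (sentence : String) : Prop :=
  sentence.toList ≠ [] ∧
  ¬ (2 ≤ sentence.toList.length ∧
     sentence.toList.getD (sentence.toList.length - 2) ' ' = '.' ∧
     sentence.toList.getD (sentence.toList.length - 1) ' ' = ' ')
instance (sentence : String) : Decidable (Pre_lower_case_sentence_beginnings sentence) := by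
  unfold Pre_lower_case_sentence_beginnings; infer_instance

def pvWitness_lower_case_sentence_beginnings : String := "Abc. Def"

def Spec_lower_case_sentence_beginnings (sentence : String) (out : String) : Prop :=
  out = lower_case_sentence_beginnings_alt sentence
instance (sentence : String) (out : String) : Decidable (Spec_lower_case_sentence_beginnings sentence out) := by unfold Spec_lower_case_sentence_beginnings; infer_instance

-- ===== CLAIM (what is proved, stated in full; the proofs are below) =====
def Claim_equal_lower_case_sentence_beginnings : Prop := ∀ (sentence : String), Dom_lower_case_sentence_beginnings sentence → Pre_lower_case_sentence_beginnings sentence → Spec_lower_case_sentence_beginnings sentence (lower_case_sentence_beginnings sentence)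

-- ===== LEMMAS AND PROOFS =====

-- The common characterisation: character j of the result is lowered iff j = 0 or the two
-- preceding characters are '. '.
def pvSpecF (l : List Char) (j : Nat) : Char :=
  if j = 0 ∨ (2 ≤ j ∧ l.getD (j - 2) ' ' = '.' ∧ l.getD (j - 1) ' ' = ' ')
  then PySem.Chars.lowerChar (l.getD j ' ') else l.getD j ' '

-- (prev2, prev1) held by B's loop just before step j are (pvPrev l j, pvPrev l (j+1)).
def pvPrev (l : List Char) (j : Nat) : Char :=
  if j = 0 then '.' else if j = 1 then ' ' else l.getD (j - 2) ' '

theorem pvStepA_getD (cs : List Char) (i j : Nat) :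
    (pvStepA cs i).getD j ' ' =
      if i + 2 = j then PySem.Chars.lowerChar (cs.getD j ' ') else cs.getD j ' ' := by
  unfold pvStepA
  by_cases h : i + 2 = j
  · subst h
    by_cases hlt : i + 2 < cs.length
    · simp [List.getD, hlt]
    · rw [List.set_eq_of_length_le (by omega),
        List.getD_eq_default _ _ (by omega), if_pos rfl]
      decide
  · simp [List.getD, h]

theorem pvFoldA (P : List Nat) (hP : P.Pairwise (· < ·)) (cs : List Char) (j : Nat) :
    (P.foldl pvStepA cs).getD j ' ' =
      if ∃ i ∈ P, i + 2 = j then PySem.Chars.lowerChar (cs.getD j ' ') else cs.getD j ' ' := by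
  induction P generalizing cs with
  | nil => simp
  | cons i P' ih =>
    rw [List.foldl_cons, ih (List.Pairwise.sublist (List.sublist_cons_self i P') hP)]
    have hlt : ∀ i' ∈ P', i < i' := fun i' h' => (List.pairwise_cons.mp hP).1 i' h'
    by_cases hex : ∃ i' ∈ P', i' + 2 = j
    · obtain ⟨i', hi', hj⟩ := hex
      have hne : ¬ i + 2 = j := by have := hlt i' hi'; omega
      rw [if_pos ⟨i', hi', hj⟩, pvStepA_getD, if_neg hne,
        if_pos ⟨i', List.mem_cons_of_mem _ hi', hj⟩]
    · rw [if_neg hex, pvStepA_getD]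
      by_cases h : i + 2 = j
      · rw [if_pos h, if_pos ⟨i, List.mem_cons_self, h⟩]
      · rw [if_neg h, if_neg (fun ⟨i', hi', hj⟩ =>
          (List.mem_cons.mp hi').elim (fun he => h (he ▸ hj)) (fun hmem => hex ⟨i', hmem, hj⟩))]

theorem pvCondB (l : List Char) (j : Nat) :
    (pvPrev l j = '.' ∧ pvPrev l (j + 1) = ' ') ↔
      (j = 0 ∨ (2 ≤ j ∧ l.getD (j - 2) ' ' = '.' ∧ l.getD (j - 1) ' ' = ' ')) := by
  unfold pvPrev
  rcases j with _ | _ | j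
  · simp
  · simp
  · have h2 : ¬ (j + 2 = 0) := by omega
    have h1 : ¬ (j + 2 = 1) := by omega
    have h3 : ¬ (j + 2 + 1 = 0) := by omega
    have h4 : ¬ (j + 2 + 1 = 1) := by omega
    simp only [if_neg h2, if_neg h1, if_neg h3, if_neg h4]
    constructor
    · rintro ⟨ha, hb⟩
      exact Or.inr ⟨by omega, by simpa using ha, by simpa using hb⟩
    · rintro (h | ⟨_, ha, hb⟩)
      · omega
      · exact ⟨by simpa using ha, by simpa using hb⟩

theorem pvFoldB (l : List Char) (rest : List Char) (j : Nat) (acc : List Char)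
    (hrest : rest = l.drop j) :
    (rest.foldl pvStepB ((pvPrev l j, pvPrev l (j + 1)), acc)).2 =
      acc ++ (List.range' j rest.length).map (pvSpecF l) := by
  induction rest generalizing j acc with
  | nil => simp
  | cons c rest' ih =>
    have hjlt : j < l.length := by
      by_contra hge
      rw [List.drop_eq_nil_of_le (by omega)] at hrest
      exact List.cons_ne_nil _ _ hrest
    have hdrop := List.drop_eq_getElem_cons hjlt
    rw [hdrop] at hrest
    obtain ⟨hc, hrest'⟩ : c = l[j] ∧ rest' = l.drop (j + 1) :=
      ⟨(List.cons_eq_cons.mp hrest).1, (List.cons_eq_cons.mp hrest).2⟩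
    have hcget : c = l.getD j ' ' := by rw [List.getD_eq_getElem _ _ hjlt, hc]
    have hprev2 : pvPrev l (j + 2) = c := by
      unfold pvPrev
      rw [if_neg (by omega), if_neg (by omega)]
      simpa using hcget.symm
    rw [List.foldl_cons]
    have hstep : pvStepB ((pvPrev l j, pvPrev l (j + 1)), acc) c =
        ((pvPrev l (j + 1), pvPrev l (j + 2)), acc ++ [pvSpecF l j]) := by
      unfold pvStepB
      simp only [hprev2]
      congr 1
      unfold pvSpecF
      by_cases hcond : pvPrev l j = '.' ∧ pvPrev l (j + 1) = ' '
      · rw [if_pos hcond, if_pos ((pvCondB l j).mp hcond), hcget]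
      · rw [if_neg hcond, if_neg (fun h => hcond ((pvCondB l j).mpr h)), hcget]
    rw [hstep, ih (j + 1) (acc ++ [pvSpecF l j]) hrest']
    simp [List.range'_succ]

theorem pvAltEq (s : String) :
    lower_case_sentence_beginnings_alt s =
      String.ofList ((List.range s.toList.length).map (pvSpecF s.toList)) := by
  unfold lower_case_sentence_beginnings_alt
  have h0 : (('.', ' '), ([] : List Char)) =
      ((pvPrev s.toList 0, pvPrev s.toList (0 + 1)), ([] : List Char)) := by
    simp [pvPrev]
  rw [h0, pvFoldB s.toList s.toList 0 [] (by simp)]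
  simp [List.range_eq_range']

theorem pvLenFoldA (P : List Nat) (cs : List Char) :
    (P.foldl pvStepA cs).length = cs.length := by
  induction P generalizing cs with
  | nil => rfl
  | cons i P' ih => rw [List.foldl_cons, ih]; simp [pvStepA]

theorem pvTakeTwo (l : List Char) (i : Nat) (hi : i + 1 < l.length) :
    (l.drop i).take 2 = [l.getD i ' ', l.getD (i + 1) ' '] := by
  rw [List.drop_eq_getElem_cons (by omega), List.drop_eq_getElem_cons hi,
    List.getD_eq_getElem _ _ (by omega), List.getD_eq_getElem _ _ hi]
  rfl

theorem pvAEq (s : String) :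
    lower_case_sentence_beginnings s =
      String.ofList ((List.range s.toList.length).map (pvSpecF s.toList)) := by
  unfold lower_case_sentence_beginnings
  dsimp only
  set l := s.toList with hl
  set chars0 := l.set 0 (PySem.Chars.lowerChar (l.getD 0 ' ')) with hchars0
  set P := (List.range (l.length - 1)).filter
      (fun (i : Nat) => PySem.List.slice l (some (i : Int)) (some ((i : Int) + 2)) == ['.', ' '])
    with hP
  have hif : (if P ≠ [] then P.foldl pvStepA chars0 else chars0) = P.foldl pvStepA chars0 := by
    by_cases hp : P = [] <;> simp [hp]
  rw [hif]
  have hPpair : P.Pairwise (· < ·) :=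
    List.Pairwise.sublist List.filter_sublist List.pairwise_lt_range
  have hmem : ∀ i : Nat, i ∈ P ↔
      i + 1 < l.length ∧ l.getD i ' ' = '.' ∧ l.getD (i + 1) ' ' = ' ' := by
    intro i
    rw [hP, List.mem_filter, List.mem_range]
    have hc : ((i : Int) + 2) = ((i : Int) + ((2 : Nat) : Int)) := by norm_num
    rw [hc, PySem.List.slice_natCast_add]
    constructor
    · rintro ⟨hlt, heq⟩
      have hi1 : i + 1 < l.length := by omega
      rw [pvTakeTwo l i hi1] at heq
      have := List.cons_eq_cons.mp (by exact_mod_cast (beq_iff_eq.mp heq))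
      exact ⟨hi1, this.1, (List.cons_eq_cons.mp this.2).1⟩
    · rintro ⟨hi1, ha, hb⟩
      refine ⟨by omega, ?_⟩
      rw [pvTakeTwo l i hi1, ha, hb]
      rfl
  congr 1
  apply List.ext_getElem
  · simp [pvLenFoldA, hchars0]
  · intro j h1 h2
    have hjn : j < l.length := by
      rw [pvLenFoldA, hchars0, List.length_set] at h1
      exact h1
    rw [← List.getD_eq_getElem _ ' ' h1, ← List.getD_eq_getElem _ ' ' h2,
      pvFoldA P hPpair chars0 j]
    have hrhs : ((List.range l.length).map (pvSpecF l)).getD j ' ' = pvSpecF l j := by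
      rw [List.getD_eq_getElem _ ' ' h2]
      simp
    rw [hrhs]
    have hchars0j : ∀ hj0 : j ≠ 0, chars0.getD j ' ' = l.getD j ' ' := by
      intro hj0
      simp [hchars0, List.getD, Ne.symm hj0]
    by_cases hex : ∃ i ∈ P, i + 2 = j
    · obtain ⟨i, hiP, hij⟩ := hex
      obtain ⟨hi1, ha, hb⟩ := (hmem i).mp hiP
      rw [if_pos ⟨i, hiP, hij⟩, hchars0j (by omega)]
      unfold pvSpecF
      rw [if_pos (Or.inr ⟨by omega, by simpa [show j - 2 = i by omega] using ha,
        by simpa [show j - 1 = i + 1 by omega] using hb⟩)]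
    · rw [if_neg hex]
      by_cases hj0 : j = 0
      · subst hj0
        unfold pvSpecF
        rw [if_pos (Or.inl rfl)]
        simp [hchars0, List.getD, hjn]
      · rw [hchars0j hj0]
        unfold pvSpecF
        rw [if_neg ?_]
        rintro (h | ⟨h2j, ha, hb⟩)
        · exact hj0 h
        · refine hex ⟨j - 2, (hmem (j - 2)).mpr ⟨by omega, ha, ?_⟩, by omega⟩
          simpa [show j - 2 + 1 = j - 1 by omega] using hb

-- ===== VERDICT (by name: the statement is the Claim_ definition above) =====
theorem lower_case_sentence_beginnings_spec : Claim_equal_lower_case_sentence_beginnings := by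
  intro s _ _
  unfold Spec_lower_case_sentence_beginnings
  rw [pvAEq s, pvAltEq s]
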